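-- pv_equiv track=rewrite | github.com/DR-FREKE/PythonProject | HackerRank/stringmanipulation.py | subStrArr
-- ===== SOURCE A (Python) =====
-- def subStrArr(strArr):
--     count = 0
--     initial_str = strArr.pop(0);
--     str_split = strArr[0].split(",")
--     for n in range(len(str_split)):
--         if str_split[n] in initial_str:
--              count = count + 1
--     return -1 if count == 0 else count;
-- ===== SOURCE B (Python) =====
-- def subStrArr(strArr):
--     text = strArr.pop(0)
--     n = len(text)
--     subs = {text[i:j] for i in range(n + 1) for j in range(i, n + 1)}
--     count = sum(1 for q in strArr[0].split(",") if q in subs)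
--     return count if count else -1
-- ===== Notes on version B (the rewrite author's own statement) =====
-- stated objective: alternative
-- what changed: B precomputes the set of all substrings of the first string once and counts queries by O(1) hash-set membership, instead of A's per-query substring scan over the text with index-based looping.
import Mathlib
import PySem

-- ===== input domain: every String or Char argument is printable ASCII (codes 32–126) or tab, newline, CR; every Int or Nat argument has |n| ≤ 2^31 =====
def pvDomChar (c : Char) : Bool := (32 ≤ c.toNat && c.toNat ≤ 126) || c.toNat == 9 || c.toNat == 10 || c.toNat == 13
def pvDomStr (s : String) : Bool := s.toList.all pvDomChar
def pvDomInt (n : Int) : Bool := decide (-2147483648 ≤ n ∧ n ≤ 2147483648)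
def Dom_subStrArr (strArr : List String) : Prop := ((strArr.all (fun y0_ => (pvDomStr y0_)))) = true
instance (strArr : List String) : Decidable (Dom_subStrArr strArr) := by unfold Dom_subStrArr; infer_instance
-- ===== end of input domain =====

-- B replaces A's per-query substring scan by one precomputed set of all substrings of the
-- first string with O(1) hash lookups per query (alternative decomposition; return value only:
-- both Pythons pop strArr[0] in place, identically).

-- ===== PORT A =====
def subStrArr (strArr : List String) : Int :=
  match strArr with
  | [] => 0  -- unreachable under Pre_: Python's strArr.pop(0) raises IndexError
  | initial_str :: rest =>
    match rest with
    | [] => 0  -- unreachable under Pre_: strArr[0] after the pop raises IndexError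
    | second :: _ =>
      -- strArr[0].split(","): sep "," ≠ "", so split? is always some
      let str_split := (PySem.Str.split? second ",").getD []
      let count := (List.range str_split.length).foldl
        (fun count n =>
          if PySem.Str.isIn (str_split.getD n "") initial_str then count + 1 else count)
        (0 : Int)
      if count = 0 then -1 else count

-- ===== PORT B =====
-- {text[i:j] for i in range(n+1) for j in range(i, n+1)}: text[i:j] with 0 ≤ i ≤ j is exactly
-- (cs.drop i).take (j - i), and range(i, n+1) is List.range' i (n+1-i) — exact here.
def pvAllSubs (cs : List Char) : PySem.Set (List Char) :=
  PySem.Set.ofList ((List.range (cs.length + 1)).flatMap (fun i =>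
    (List.range' i (cs.length + 1 - i)).map (fun j => (cs.drop i).take (j - i))))

def subStrArr_alt (strArr : List String) : Int :=
  match strArr with
  | text :: second :: _ =>
    let subs := pvAllSubs text.toList
    let count := ((PySem.Str.split? second ",").getD []).foldl
      (fun c q => if PySem.Set.contains subs q.toList then c + 1 else c) (0 : Int)
    if count ≠ 0 then count else -1
  | _ => -1  -- unreachable under Pre_ (the Python raises IndexError there)

-- ===== PRECONDITION & SPEC =====
-- Pre_ excludes lists with fewer than two elements, on which the Python A raises IndexError.
def Pre_subStrArr (strArr : List String) : Prop := 2 ≤ strArr.length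
instance (strArr : List String) : Decidable (Pre_subStrArr strArr) := by unfold Pre_subStrArr; infer_instance
def pvWitness_subStrArr : List String := ["hello", "he,zz,lo"]

def Spec_subStrArr (strArr : List String) (out : Int) : Prop := out = subStrArr_alt strArr
instance (strArr : List String) (out : Int) : Decidable (Spec_subStrArr strArr out) := by unfold Spec_subStrArr; infer_instance

-- ===== CLAIM (what is proved, stated in full; the proofs are below) =====
def Claim_equal_subStrArr : Prop := ∀ (strArr : List String), Dom_subStrArr strArr → Pre_subStrArr strArr → Spec_subStrArr strArr (subStrArr strArr)

-- ===== LEMMAS AND PROOFS =====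

-- membership in B's precomputed substring set is exactly "prefix of some suffix"
lemma mem_pvAllSubs (cs q : List Char) :
    q ∈ pvAllSubs cs ↔ ∃ j, q <+: cs.drop j := by
  unfold pvAllSubs
  rw [PySem.Set.mem_ofList]
  simp only [List.mem_flatMap, List.mem_map, List.mem_range, List.mem_range'_1]
  constructor
  · rintro ⟨i, _, j, _, rfl⟩
    exact ⟨i, List.take_prefix _ _⟩
  · rintro ⟨j, hpre⟩
    refine ⟨min j cs.length, by omega, min j cs.length + q.length, ⟨by omega, ?_⟩, ?_⟩
    · have hd : cs.drop (min j cs.length) = cs.drop j := by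
        rcases le_or_gt j cs.length with h | h
        · rw [min_eq_left h]
        · rw [min_eq_right (le_of_lt h), List.drop_length, List.drop_eq_nil_of_le (le_of_lt h)]
      have hlen : q.length ≤ (cs.drop (min j cs.length)).length := by
        rw [hd]; exact hpre.length_le
      rw [List.length_drop] at hlen
      omega
    · have hd : cs.drop (min j cs.length) = cs.drop j := by
        rcases le_or_gt j cs.length with h | h
        · rw [min_eq_left h]
        · rw [min_eq_right (le_of_lt h), List.drop_length, List.drop_eq_nil_of_le (le_of_lt h)]
      rw [Nat.add_sub_cancel_left, hd]
      exact (List.prefix_iff_eq_take.mp hpre).symm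

-- hence the set lookup computes Python's 'q in text'
lemma contains_pvAllSubs (text q : String) :
    PySem.Set.contains (pvAllSubs text.toList) q.toList = PySem.Str.isIn q text := by
  rw [PySem.Str.isIn_eq]
  by_cases h : ∃ j, q.toList <+: List.drop j text.toList
  · rw [(PySem.Chars.exists_prefix_drop_iff_isIn _ _).mp h]
    simpa [PySem.Set.contains] using (mem_pvAllSubs text.toList q.toList).mpr h
  · cases hb : PySem.Chars.isIn q.toList text.toList with
    | true => exact absurd ((PySem.Chars.exists_prefix_drop_iff_isIn _ _).mpr hb) h
    | false =>
      have : q.toList ∉ pvAllSubs text.toList := fun hc => h ((mem_pvAllSubs _ _).mp hc)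
      simpa [PySem.Set.contains] using this

-- reading a list back off by index over range(len) is the list itself
lemma map_getD_range (l : List String) : (List.range l.length).map (fun n => l.getD n "") = l := by
  apply List.ext_getElem
  · simp
  · intro i h1 h2
    simp [List.getD_eq_getElem?_getD, List.getElem?_eq_getElem h2]

lemma countP_range_getD (l : List String) (p : String → Bool) :
    (List.range l.length).countP (fun n => p (l.getD n "")) = l.countP p := by
  conv_rhs => rw [← map_getD_range l, List.countP_map]
  rfl

theorem subStrArr_spec : Claim_equal_subStrArr := by
  intro strArr _ hpre
  unfold Spec_subStrArr
  match strArr with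
  | [] => simp [Pre_subStrArr] at hpre
  | [x] => simp [Pre_subStrArr] at hpre
  | text :: second :: rest =>
    show subStrArr (text :: second :: rest) = subStrArr_alt (text :: second :: rest)
    unfold subStrArr subStrArr_alt
    simp only
    rw [PySem.List.foldl_if_add_one, PySem.List.foldl_if_add_one]
    have hcnt :
        (List.range ((PySem.Str.split? second ",").getD []).length).countP
          (fun n => PySem.Str.isIn (((PySem.Str.split? second ",").getD []).getD n "") text)
        = ((PySem.Str.split? second ",").getD []).countP
          (fun q => PySem.Set.contains (pvAllSubs text.toList) q.toList) := by
      rw [countP_range_getD _ (fun q => PySem.Str.isIn q text)]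
      exact List.countP_congr (fun q _ => by rw [contains_pvAllSubs])
    rw [hcnt]
    split_ifs <;> omega
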